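-- pv_equiv track=rewrite | github.com/addw1/AlgorithmGuide | code/test/my-git.py | weave_array
-- ===== SOURCE A (Python) =====
-- def weave_array(numbers):
--     n = len(numbers)
--     left = 0
--     right = n - 1
--     result = []
--
--     while left <= right:
--         # Take from the left pointer
--         result.append(numbers[left])
--         left += 1
--
--         # Check if we still have elements left on the right side
--         if left <= right:
--             result.append(numbers[right])
--             right -= 1
--
--     return result
--
-- numbers = [10, 20, 30, 40, 50, 60]
-- ===== SOURCE B (Python) =====
-- from itertools import chain
--
-- def weave_array(numbers):
--     pairs = zip(numbers, reversed(numbers))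
--     return list(chain.from_iterable(pairs))[:len(numbers)]
-- ===== Notes on version B (the rewrite author's own statement) =====
-- stated objective: idiomatic
-- what changed: Replaces the two-pointer while loop with zipping the list against its reverse, flattening the pairs, and slicing to the original length.
import Mathlib
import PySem

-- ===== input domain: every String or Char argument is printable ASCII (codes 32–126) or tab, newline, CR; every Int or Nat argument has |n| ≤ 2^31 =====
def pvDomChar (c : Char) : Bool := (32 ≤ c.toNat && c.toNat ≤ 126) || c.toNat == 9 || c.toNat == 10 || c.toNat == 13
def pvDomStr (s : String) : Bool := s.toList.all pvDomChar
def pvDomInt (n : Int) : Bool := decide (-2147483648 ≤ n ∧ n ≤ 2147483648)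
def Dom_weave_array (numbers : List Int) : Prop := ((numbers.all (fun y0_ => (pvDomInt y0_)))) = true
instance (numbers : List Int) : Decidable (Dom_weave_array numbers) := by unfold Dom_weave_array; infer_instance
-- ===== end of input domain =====

-- B replaces A's two-pointer while loop by zipping the list with its reverse, flattening
-- the pairs and truncating to the original length (objective: idiomatic; same O(n) cost).

-- ===== PORT A =====
-- two-pointer while loop; the 'none' branches are unreachable totality guards
-- (within weave_array's call the indices always stay in range, so Python never raises)
def weaveLoop (xs : List Int) (left right : Int) (result : List Int) : List Int :=
  if _h : left ≤ right then
    match PySem.List.pyGet? xs left with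
    | none => result
    | some x =>
      if _h2 : left + 1 ≤ right then
        match PySem.List.pyGet? xs right with
        | none => result ++ [x]
        | some y => weaveLoop xs (left + 1) (right - 1) (result ++ [x] ++ [y])
      else result ++ [x]
  else result
termination_by (right + 1 - left).toNat
decreasing_by omega

def weave_array (numbers : List Int) : List Int :=
  let n : Int := numbers.length
  weaveLoop numbers 0 (n - 1) []

-- ===== PORT B =====
def weave_array_alt (numbers : List Int) : List Int :=
  ((numbers.zip numbers.reverse).flatMap (fun p => [p.1, p.2])).take numbers.length

-- ===== PRECONDITION & SPEC =====
def Spec_weave_array (numbers : List Int) (out : List Int) : Prop := out = weave_array_alt numbers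
instance (numbers : List Int) (out : List Int) : Decidable (Spec_weave_array numbers out) := by unfold Spec_weave_array; infer_instance

-- ===== CLAIM (what is proved, stated in full; the proofs are below) =====
def Claim_equal_weave_array : Prop := ∀ (numbers : List Int), Dom_weave_array numbers → Spec_weave_array numbers (weave_array numbers)

-- ===== LEMMAS AND PROOFS =====

/-- Reference both-ends weave, used only in the proofs. -/
def fweave : List Int → List Int
  | [] => []
  | [x] => [x]
  | x :: y :: rest =>
      x :: ((y :: rest).getLast (by simp)) :: fweave ((y :: rest).dropLast)
termination_by xs => xs.length
decreasing_by simp [List.length_dropLast]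

lemma fweave_step (a b : Int) (mid : List Int) :
    fweave (a :: (mid ++ [b])) = a :: b :: fweave mid := by
  cases mid with
  | nil => simp [fweave]
  | cons m ms =>
      have hd : (m :: (ms ++ [b])).dropLast = m :: ms := by rw [← List.cons_append, List.dropLast_concat]
      simp [fweave, hd]

lemma weaveLoop_eq (xs : List Int) (k : ℕ) :
    ∀ (l r : Int) (acc : List Int), (r + 1 - l).toNat ≤ k → 0 ≤ l → r < xs.length →
      weaveLoop xs l r acc = acc ++ fweave ((xs.drop l.toNat).take (r + 1 - l).toNat) := by
  induction k with
  | zero =>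
      intro l r acc hk hl hr
      have hrl : ¬ l ≤ r := by omega
      rw [weaveLoop]
      simp [hrl, show (r + 1 - l).toNat = 0 by omega, fweave]
  | succ k ih =>
      intro l r acc hk hl hr
      by_cases hlr : l ≤ r
      · have hlen : l.toNat < xs.length := by omega
        have hget : PySem.List.pyGet? xs l = some xs[l.toNat] :=
          PySem.List.pyGet?_eq_some_getElem _ hl (by omega)
        rw [weaveLoop]
        simp only [hlr, dite_true, hget]
        have hdrop : xs.drop l.toNat = xs[l.toNat] :: xs.drop (l.toNat + 1) :=
          (List.getElem_cons_drop hlen).symm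
        by_cases h2 : l + 1 ≤ r
        · have hrlen : r.toNat < xs.length := by omega
          have hgetr : PySem.List.pyGet? xs r = some xs[r.toNat] :=
            PySem.List.pyGet?_eq_some_getElem _ (by omega) (by omega)
          simp only [h2, dite_true, hgetr]
          rw [ih (l + 1) (r - 1) _ (by omega) (by omega) (by omega)]
          -- shape of the slice: head, middle, last
          have hk2 : (r + 1 - l).toNat = (r - l - 1).toNat + 2 := by omega
          have hmidlast :
              (xs.drop (l.toNat + 1)).take ((r - l - 1).toNat + 1)
                = (xs.drop (l.toNat + 1)).take ((r - l - 1).toNat) ++ [xs[r.toNat]] := by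
            rw [List.take_add_one]
            have hb : l.toNat + 1 + (r - l - 1).toNat = r.toNat := by omega
            have hsome : (xs.drop (l.toNat + 1))[(r - l - 1).toNat]? = some xs[r.toNat] := by
              rw [List.getElem?_drop, hb, List.getElem?_eq_getElem hrlen]
            rw [hsome]
            rfl
          have hslice :
              (xs.drop l.toNat).take ((r + 1 - l).toNat)
                = xs[l.toNat] :: ((xs.drop (l.toNat + 1)).take ((r - l - 1).toNat) ++ [xs[r.toNat]]) := by
            rw [hk2, hdrop, List.take_succ_cons, ← hmidlast]
          rw [hslice, fweave_step]
          rw [show (l + 1).toNat = l.toNat + 1 by omega,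
              show (r - 1 + 1 - (l + 1)).toNat = (r - l - 1).toNat by omega]
          simp
        · have hlr2 : l = r := by omega
          have h1 : (r + 1 - l).toNat = 1 := by omega
          rw [h1]
          simp [show ¬ (l + 1 ≤ r) by omega]
          rw [hdrop, List.take_succ_cons, List.take_zero]
          simp only [fweave]
      · rw [weaveLoop]
        simp [hlr, show (r + 1 - l).toNat = 0 by omega, fweave]

lemma flat_pairs_length (ps : List (Int × Int)) :
    (ps.flatMap (fun p => [p.1, p.2])).length = 2 * ps.length := by
  induction ps with
  | nil => simp
  | cons p ps ih => simp [ih]; omega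

lemma alt_eq_fweave : ∀ (k : ℕ) (xs : List Int), xs.length ≤ k → weave_array_alt xs = fweave xs := by
  intro k
  induction k with
  | zero =>
      intro xs hk
      have : xs = [] := by cases xs <;> simp_all
      simp [this, weave_array_alt, fweave]
  | succ k ih =>
      intro xs hk
      match xs with
      | [] => simp [weave_array_alt, fweave]
      | [x] => simp [weave_array_alt, fweave]
      | x :: y :: rest =>
        obtain ⟨q, b, hqb⟩ := ((y :: rest).eq_nil_or_concat).resolve_left (by simp)
        have hx : x :: y :: rest = x :: (q ++ [b]) := by rw [hqb, List.concat_eq_append]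
        rw [hx, fweave_step]
        have hrev : (x :: (q ++ [b])).reverse = b :: (q.reverse ++ [x]) := by simp
        have hlen : q.length = q.reverse.length := by simp
        unfold weave_array_alt
        rw [hrev]
        have hzip : (x :: (q ++ [b])).zip (b :: (q.reverse ++ [x]))
            = (x, b) :: ((q.zip q.reverse) ++ ([b].zip [x])) := by
          rw [List.zip_cons_cons, List.zip_append hlen]
        rw [hzip]

        have hlen2 : (x :: (q ++ [b])).length = q.length + 2 := by simp
        rw [hlen2]
        simp only [List.flatMap_cons, List.flatMap_append]
        have hq : ((q.zip q.reverse).flatMap fun p => [p.1, p.2]).length = 2 * q.length := by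
          rw [flat_pairs_length, List.length_zip]; simp
        have htake : ∀ (u v : List Int), u.length = 2 * q.length →
            (([x, b] ++ (u ++ v)).take (q.length + 2)) = x :: b :: u.take q.length := by
          intro u v hu
          simp [List.take_append_of_le_length (by omega : q.length ≤ u.length)]
        rw [htake _ _ hq]
        have hq2 : ((q.zip q.reverse).flatMap fun p => [p.1, p.2]).take q.length
            = weave_array_alt q := by
          unfold weave_array_alt; rfl
        have hql : q.length = rest.length := by
          have := congrArg List.length hqb
          simp at this; omega
        rw [hq2, ih q (by simp at hk; omega)]

-- ===== VERDICT (by name: the statement is the Claim_ definition above) =====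
theorem weave_array_spec : Claim_equal_weave_array := by
  intro numbers _
  unfold Spec_weave_array weave_array
  simp only []
  rw [weaveLoop_eq numbers (numbers.length) 0 ((numbers.length : Int) - 1) []
      (by omega) le_rfl (by omega)]
  have h1 : (((numbers.length : Int) - 1) + 1 - 0).toNat = numbers.length := by omega
  rw [h1]
  simp [alt_eq_fweave numbers.length numbers le_rfl]
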